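-- pv_equiv track=rewrite | github.com/kenjitheman/uni | labs/python/4/student_main.py | task10
-- ===== SOURCE A (Python) =====
-- def task10(row_num):
--     def generate_pascals_triangle(rows):
--         triangle = [[1]]
--         for _ in range(1, rows):
--             previous_row = triangle[-1]
--             new_row = [1] + [previous_row[i-1] + previous_row[i] for i in range(1, len(previous_row))] + [1]
--             triangle.append(new_row)
--         return triangle
--
--     triangle = generate_pascals_triangle(row_num + 1)
--     return max(triangle[-1])
-- ===== SOURCE B (Python) =====
-- def task10(row_num):
--     row = [1]
--     for k in range(row_num):
--         row.append(row[-1] * (row_num - k) // (k + 1))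
--     return max(row)
-- ===== Notes on version B (the rewrite author's own statement) =====
-- stated objective: faster
-- what changed: B computes only the target row with the multiplicative binomial recurrence row.append(row[-1]*(row_num-k)//(k+1)) instead of building every row of the triangle by pairwise addition.
import Mathlib
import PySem

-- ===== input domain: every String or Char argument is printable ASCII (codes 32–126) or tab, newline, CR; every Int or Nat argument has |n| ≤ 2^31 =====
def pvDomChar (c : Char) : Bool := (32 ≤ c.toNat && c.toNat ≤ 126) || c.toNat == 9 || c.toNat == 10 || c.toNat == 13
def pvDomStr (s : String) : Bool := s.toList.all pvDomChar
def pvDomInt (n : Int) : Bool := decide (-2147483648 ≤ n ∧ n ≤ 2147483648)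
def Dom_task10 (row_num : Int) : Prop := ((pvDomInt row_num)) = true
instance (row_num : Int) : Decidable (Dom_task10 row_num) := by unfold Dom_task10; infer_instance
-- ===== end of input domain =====

-- B replaces A's row-by-row additive construction of the whole triangle by the
-- multiplicative binomial recurrence on the single target row (objective: faster, O(n) vs O(n^2) additions).

-- ===== PORT A =====
-- A's nested helper; previous_row[i-1]/previous_row[i] are always in range and
-- triangle[-1] always exists, so pyGetD with defaults is exact here.
def generate_pascals_triangle (rows : Int) : List (List Int) :=
  (PySem.List.pyRange 1 rows).foldl
    (fun triangle _ =>
      let previous_row := PySem.List.pyGetD triangle (-1) []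
      let new_row := [(1 : Int)] ++
        ((PySem.List.pyRange 1 (previous_row.length : Int)).map
          (fun i => PySem.List.pyGetD previous_row (i - 1) 0 + PySem.List.pyGetD previous_row i 0)) ++ [(1 : Int)]
      triangle ++ [new_row])
    [[(1 : Int)]]

-- max(triangle[-1]) never raises (the last row is nonempty), so .getD 0 is exact.
def task10 (row_num : Int) : Int :=
  let triangle := generate_pascals_triangle (row_num + 1)
  (PySem.List.max? (PySem.List.pyGetD triangle (-1) []) (fun y => y)).getD 0

-- ===== PORT B =====
def task10_alt (row_num : Int) : Int :=
  let row := (PySem.List.pyRange 0 row_num).foldl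
    (fun row k =>
      row ++ [PySem.Int.floordiv (PySem.List.pyGetD row (-1) 0 * (row_num - k)) (k + 1)])
    [(1 : Int)]
  (PySem.List.max? row (fun y => y)).getD 0

-- ===== PRECONDITION & SPEC =====
def Spec_task10 (row_num : Int) (out : Int) : Prop := out = task10_alt row_num
instance (row_num : Int) (out : Int) : Decidable (Spec_task10 row_num out) := by unfold Spec_task10; infer_instance

-- ===== CLAIM (what is proved, stated in full; the proofs are below) =====
def Claim_equal_task10 : Prop := ∀ (row_num : Int), Dom_task10 row_num → Spec_task10 row_num (task10 row_num)

-- ===== LEMMAS AND PROOFS =====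

-- the n-th row of Pascal's triangle
def pascalRow (n : Nat) : List Int := (List.range (n + 1)).map (fun k => ((n.choose k : Nat) : Int))

-- A's additive step turns row n into row n+1
theorem pascalRow_step (n : Nat) :
    [(1 : Int)] ++
      ((PySem.List.pyRange 1 ((pascalRow n).length : Int)).map
        (fun i => PySem.List.pyGetD (pascalRow n) (i - 1) 0 + PySem.List.pyGetD (pascalRow n) i 0)) ++ [(1 : Int)]
      = pascalRow (n + 1) := by
  have hlen : ((pascalRow n).length : Int) = ((n + 1 : Nat) : Int) := by
    simp [pascalRow]
  rw [hlen, PySem.List.pyRange_one]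
  have ht : ((((n + 1 : Nat) : Int)) - 1).toNat = n := by omega
  rw [ht, List.map_map]
  have hmap : ∀ k ∈ List.range n,
      ((fun i => PySem.List.pyGetD (pascalRow n) (i - 1) 0 + PySem.List.pyGetD (pascalRow n) i 0) ∘ fun k => (1 : Int) + ↑k) k
        = (((n + 1).choose (k + 1) : Nat) : Int) := by
    intro k hk
    have hk' : k < n := List.mem_range.mp hk
    have h2 : (1 : Int) + (k : Int) = (((k + 1 : Nat)) : Int) := by push_cast; omega
    have h1 : (((k + 1 : Nat)) : Int) - 1 = ((k : Nat) : Int) := by push_cast; omega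
    simp only [Function.comp, h2, h1, PySem.List.pyGetD_natCast, pascalRow]
    rw [PySem.List.getD_map_range _ _ _ _ (by omega), PySem.List.getD_map_range _ _ _ _ (by omega)]
    rw [Nat.choose_succ_succ]
    push_cast
    ring
  rw [List.map_congr_left hmap]
  show _ = (List.range (n + 1 + 1)).map (fun k => (((n+1).choose k : Nat) : Int))
  rw [List.range_succ_eq_map, List.range_succ]
  simp [Nat.choose_zero_right, Nat.choose_self, Nat.succ_eq_add_one]

-- the last row of A's triangle is pascalRow n
theorem genA_last (n : Nat) :
    PySem.List.pyGetD (generate_pascals_triangle ((n : Int) + 1)) (-1) [] = pascalRow n := by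
  induction n with
  | zero =>
      simp only [Nat.cast_zero, zero_add, generate_pascals_triangle,
        PySem.List.pyRange_one_eq_nil (by norm_num : (1:Int) ≤ 1), List.foldl_nil]
      decide
  | succ n ih =>
      have hsplit : PySem.List.pyRange 1 ((↑(n + 1) : Int) + 1)
          = PySem.List.pyRange 1 ((n : Int) + 1) ++ [(n : Int) + 1] := by
        have : ((↑(n + 1) : Int) + 1) = ((n : Int) + 1) + 1 := by omega
        rw [this, PySem.List.pyRange_one_succ_right (by omega)]
      unfold generate_pascals_triangle at *
      rw [hsplit, List.foldl_append, List.foldl_cons, List.foldl_nil]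
      have hx : ∀ (t : List (List Int)) (x : List Int), PySem.List.pyGetD (t ++ [x]) (-1) ([] : List Int) = x := by
        intro t x
        simp [PySem.List.pyGetD, PySem.List.pyGet?_neg_one_append_singleton]
      simp only [hx]
      rw [ih]
      exact pascalRow_step n

-- B's fold builds the prefix of pascalRow n
theorem foldB_pref (n : Nat) : ∀ j : Nat, j ≤ n →
    (PySem.List.pyRange 0 (j : Int)).foldl
      (fun row k =>
        row ++ [PySem.Int.floordiv (PySem.List.pyGetD row (-1) 0 * ((n : Int) - k)) (k + 1)])
      [(1 : Int)]
      = (List.range (j + 1)).map (fun k => ((n.choose k : Nat) : Int)) := by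
  intro j hj
  induction j with
  | zero =>
      simp [PySem.List.pyRange_one_eq_nil (by norm_num : (0:Int) ≤ 0)]
  | succ j ih =>
      have hsplit : PySem.List.pyRange 0 ((↑(j + 1) : Int))
          = PySem.List.pyRange 0 ((j : Int)) ++ [(j : Int)] := by
        have : ((↑(j + 1) : Int)) = ((j : Int)) + 1 := by omega
        rw [this, PySem.List.pyRange_one_succ_right (by omega)]
      rw [hsplit, List.foldl_append, ih (by omega), List.foldl_cons, List.foldl_nil]
      have hlast : PySem.List.pyGetD ((List.range (j + 1)).map (fun k => ((n.choose k : Nat) : Int))) (-1) 0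
          = ((n.choose j : Nat) : Int) := by
        rw [List.range_succ, List.map_append]
        simp [PySem.List.pyGetD, PySem.List.pyGet?_neg_one_append_singleton]
      rw [hlast]
      have hsub : (n : Int) - (j : Int) = ((n - j : Nat) : Int) := by
        omega
      have hdiv : PySem.Int.floordiv (((n.choose j : Nat) : Int) * ((n : Int) - (j : Int))) ((j : Int) + 1)
          = ((n.choose (j + 1) : Nat) : Int) := by
        rw [hsub]
        have h1 : (((n.choose j : Nat)) : Int) * ((n - j : Nat) : Int) = (((n.choose j * (n - j) : Nat)) : Int) := by omega
        have h2 : ((j : Int) + 1) = (((j + 1 : Nat)) : Int) := by omega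
        rw [h1, h2, PySem.Int.floordiv_natCast]
        rw [← Nat.choose_succ_right_eq]
        rw [Nat.mul_div_cancel _ (by omega)]
      rw [hdiv, List.range_succ (n := j + 1), List.map_append]
      simp

-- ===== VERDICT (by name: the statement is the Claim_ definition above) =====
theorem task10_spec : Claim_equal_task10 := by
  intro row_num _
  unfold Spec_task10 task10 task10_alt
  by_cases h : 0 ≤ row_num
  · obtain ⟨n, rfl⟩ : ∃ n : Nat, row_num = (n : Int) := ⟨row_num.toNat, by omega⟩
    simp only [genA_last n, foldB_pref n n le_rfl, pascalRow]
  · have h1 : PySem.List.pyRange 1 (row_num + 1) = [] := PySem.List.pyRange_one_eq_nil (by omega)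
    have h2 : PySem.List.pyRange 0 row_num = [] := PySem.List.pyRange_one_eq_nil (by omega)
    simp only [generate_pascals_triangle, h1, h2, List.foldl_nil]
    decide
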